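-- pv_equiv track=rewrite | github.com/AlexanderAtlasLuthor/TrashPanda | app/scoring.py | _compute_client_reason
-- ===== SOURCE A (Python) =====
-- CLIENT_REASON_MAP: dict[str, str] = {
--     "syntax_invalid": "Invalid email format",
--     "no_domain": "Domain does not exist",
--     "nxdomain": "Domain does not exist",
--     "disposable": "Temporary/disposable email",
--     "placeholder": "Fake or placeholder email",
--     "role_account": "Role-based email",
--     "dns_no_records": "No mail server (MX) found",
--     "dns_error": "Mail server check inconclusive",
--     "domain_mismatch": "Domain does not match input",
--     "typo_corrected": "Possible domain typo",
--     "typo_suggested": "Possible domain typo",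
-- }
--
-- _CLIENT_REASON_PRIORITY: tuple[str, ...] = (
--     "placeholder",
--     "disposable",
--     "syntax_invalid",
--     "nxdomain",
--     "no_domain",
--     "role_account",
--     "dns_no_records",
--     "dns_error",
--     "domain_mismatch",
--     "typo_suggested",
--     "typo_corrected",
-- )
--
-- def _compute_client_reason(score_reasons: str) -> str:
--     """Return the primary human-readable reason derived from the internal reason tokens."""
--     if not score_reasons:
--         return ""
--     token_set = set(score_reasons.split("|"))
--     for token in _CLIENT_REASON_PRIORITY:
--         if token in token_set:
--             return CLIENT_REASON_MAP.get(token, "")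
--     return ""
-- ===== SOURCE B (Python) =====
-- _RANKED: dict[str, tuple[int, str]] = {
--     "placeholder": (0, "Fake or placeholder email"),
--     "disposable": (1, "Temporary/disposable email"),
--     "syntax_invalid": (2, "Invalid email format"),
--     "nxdomain": (3, "Domain does not exist"),
--     "no_domain": (4, "Domain does not exist"),
--     "role_account": (5, "Role-based email"),
--     "dns_no_records": (6, "No mail server (MX) found"),
--     "dns_error": (7, "Mail server check inconclusive"),
--     "domain_mismatch": (8, "Domain does not match input"),
--     "typo_suggested": (9, "Possible domain typo"),
--     "typo_corrected": (10, "Possible domain typo"),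
-- }
--
-- def _compute_client_reason(score_reasons: str) -> str:
--     """Single pass over the input tokens keeping an argmin (rank, reason) accumulator."""
--     best = (11, "")
--     for t in score_reasons.split("|"):
--         r = _RANKED.get(t)
--         if r is not None and r[0] < best[0]:
--             best = r
--     return best[1]
-- ===== Notes on version B (the rewrite author's own statement) =====
-- stated objective: alternative
-- what changed: Instead of building a token set and scanning the fixed priority tuple for the first hit, B makes a single pass over the input tokens with an argmin (rank, reason) accumulator driven by one precomputed token->(rank, reason) dict; the empty-input guard disappears.
import Mathlib
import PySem

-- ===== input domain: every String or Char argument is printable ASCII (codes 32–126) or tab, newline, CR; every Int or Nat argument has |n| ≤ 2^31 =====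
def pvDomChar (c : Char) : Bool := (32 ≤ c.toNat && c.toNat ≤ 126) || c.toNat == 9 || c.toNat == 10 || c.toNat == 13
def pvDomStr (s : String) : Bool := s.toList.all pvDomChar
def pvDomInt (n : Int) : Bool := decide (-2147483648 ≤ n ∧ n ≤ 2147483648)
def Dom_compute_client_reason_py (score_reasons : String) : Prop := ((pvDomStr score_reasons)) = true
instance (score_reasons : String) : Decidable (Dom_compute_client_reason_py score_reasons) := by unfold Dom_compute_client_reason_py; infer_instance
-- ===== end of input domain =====

set_option maxHeartbeats 1000000

-- B replaces A's priority-tuple scan over a token set by a single pass over the input tokens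
-- with an argmin (rank, reason) accumulator (objective: alternative decomposition, same cost).

-- ===== PORT A =====
-- CLIENT_REASON_MAP
def pvClientReasonMap : PySem.Dict String String := PySem.Dict.ofList
  [("syntax_invalid", "Invalid email format"),
   ("no_domain", "Domain does not exist"),
   ("nxdomain", "Domain does not exist"),
   ("disposable", "Temporary/disposable email"),
   ("placeholder", "Fake or placeholder email"),
   ("role_account", "Role-based email"),
   ("dns_no_records", "No mail server (MX) found"),
   ("dns_error", "Mail server check inconclusive"),
   ("domain_mismatch", "Domain does not match input"),
   ("typo_corrected", "Possible domain typo"),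
   ("typo_suggested", "Possible domain typo")]

-- _CLIENT_REASON_PRIORITY
def pvClientReasonPriority : List String :=
   ["placeholder", "disposable", "syntax_invalid", "nxdomain", "no_domain", "role_account", "dns_no_records", "dns_error", "domain_mismatch", "typo_suggested", "typo_corrected"]

-- 'for token in _CLIENT_REASON_PRIORITY: if token in token_set: return CLIENT_REASON_MAP.get(token, "")'
def pvLoopA : List String → PySem.Set String → String
  | [], _ => ""
  | t :: rest, tokenSet =>
    if PySem.Set.contains tokenSet t then PySem.Dict.getD pvClientReasonMap t "" else pvLoopA rest tokenSet

def compute_client_reason_py (score_reasons : String) : String :=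
  if score_reasons = "" then ""   -- 'if not score_reasons: return ""'
  else pvLoopA pvClientReasonPriority (PySem.Set.ofList ((PySem.Str.split? score_reasons "|").getD []))

-- ===== PORT B =====
-- _RANKED
def pvRanked : PySem.Dict String (Int × String) := PySem.Dict.ofList
  [("placeholder", (0, "Fake or placeholder email")),
   ("disposable", (1, "Temporary/disposable email")),
   ("syntax_invalid", (2, "Invalid email format")),
   ("nxdomain", (3, "Domain does not exist")),
   ("no_domain", (4, "Domain does not exist")),
   ("role_account", (5, "Role-based email")),
   ("dns_no_records", (6, "No mail server (MX) found")),
   ("dns_error", (7, "Mail server check inconclusive")),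
   ("domain_mismatch", (8, "Domain does not match input")),
   ("typo_suggested", (9, "Possible domain typo")),
   ("typo_corrected", (10, "Possible domain typo"))]

-- the loop body: r = _RANKED.get(t); if r is not None and r[0] < best[0]: best = r
def pvStepB (best : Int × String) (t : String) : Int × String :=
  match PySem.Dict.get? pvRanked t with
  | some r => if r.1 < best.1 then r else best
  | none => best

def compute_client_reason_py_alt (score_reasons : String) : String :=
  (((PySem.Str.split? score_reasons "|").getD []).foldl pvStepB (11, "")).2

-- ===== PRECONDITION & SPEC =====
def Spec_compute_client_reason_py (score_reasons : String) (out : String) : Prop := out = compute_client_reason_py_alt score_reasons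
instance (score_reasons : String) (out : String) : Decidable (Spec_compute_client_reason_py score_reasons out) := by unfold Spec_compute_client_reason_py; infer_instance

-- ===== CLAIM (what is proved, stated in full; the proofs are below) =====
def Claim_equal_compute_client_reason_py : Prop := ∀ (score_reasons : String), Dom_compute_client_reason_py score_reasons → Spec_compute_client_reason_py score_reasons (compute_client_reason_py score_reasons)

-- ===== LEMMAS AND PROOFS =====

-- rank of a token (11 = not a recognised token), and the reason text for each rank
def pvRk (t : String) : Int :=
  if t = "placeholder" then 0 else
  if t = "disposable" then 1 else
  if t = "syntax_invalid" then 2 else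
  if t = "nxdomain" then 3 else
  if t = "no_domain" then 4 else
  if t = "role_account" then 5 else
  if t = "dns_no_records" then 6 else
  if t = "dns_error" then 7 else
  if t = "domain_mismatch" then 8 else
  if t = "typo_suggested" then 9 else
  if t = "typo_corrected" then 10 else 11

def pvRs (i : Int) : String :=
  if i = 0 then "Fake or placeholder email" else
  if i = 1 then "Temporary/disposable email" else
  if i = 2 then "Invalid email format" else
  if i = 3 then "Domain does not exist" else
  if i = 4 then "Domain does not exist" else
  if i = 5 then "Role-based email" else
  if i = 6 then "No mail server (MX) found" else
  if i = 7 then "Mail server check inconclusive" else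
  if i = 8 then "Domain does not match input" else
  if i = 9 then "Possible domain typo" else
  if i = 10 then "Possible domain typo" else ""

lemma pvRk_cases (t : String) : pvRk t = 11 ∨
    (t = "placeholder" ∧ pvRk t = 0) ∨
    (t = "disposable" ∧ pvRk t = 1) ∨
    (t = "syntax_invalid" ∧ pvRk t = 2) ∨
    (t = "nxdomain" ∧ pvRk t = 3) ∨
    (t = "no_domain" ∧ pvRk t = 4) ∨
    (t = "role_account" ∧ pvRk t = 5) ∨
    (t = "dns_no_records" ∧ pvRk t = 6) ∨
    (t = "dns_error" ∧ pvRk t = 7) ∨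
    (t = "domain_mismatch" ∧ pvRk t = 8) ∨
    (t = "typo_suggested" ∧ pvRk t = 9) ∨
    (t = "typo_corrected" ∧ pvRk t = 10) := by
  by_cases h1 : t = "placeholder"
  · exact Or.inr (Or.inl (⟨h1, by rw [h1]; decide⟩))
  by_cases h2 : t = "disposable"
  · exact Or.inr (Or.inr (Or.inl (⟨h2, by rw [h2]; decide⟩)))
  by_cases h3 : t = "syntax_invalid"
  · exact Or.inr (Or.inr (Or.inr (Or.inl (⟨h3, by rw [h3]; decide⟩))))
  by_cases h4 : t = "nxdomain"
  · exact Or.inr (Or.inr (Or.inr (Or.inr (Or.inl (⟨h4, by rw [h4]; decide⟩)))))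
  by_cases h5 : t = "no_domain"
  · exact Or.inr (Or.inr (Or.inr (Or.inr (Or.inr (Or.inl (⟨h5, by rw [h5]; decide⟩))))))
  by_cases h6 : t = "role_account"
  · exact Or.inr (Or.inr (Or.inr (Or.inr (Or.inr (Or.inr (Or.inl (⟨h6, by rw [h6]; decide⟩)))))))
  by_cases h7 : t = "dns_no_records"
  · exact Or.inr (Or.inr (Or.inr (Or.inr (Or.inr (Or.inr (Or.inr (Or.inl (⟨h7, by rw [h7]; decide⟩))))))))
  by_cases h8 : t = "dns_error"
  · exact Or.inr (Or.inr (Or.inr (Or.inr (Or.inr (Or.inr (Or.inr (Or.inr (Or.inl (⟨h8, by rw [h8]; decide⟩)))))))))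
  by_cases h9 : t = "domain_mismatch"
  · exact Or.inr (Or.inr (Or.inr (Or.inr (Or.inr (Or.inr (Or.inr (Or.inr (Or.inr (Or.inl (⟨h9, by rw [h9]; decide⟩))))))))))
  by_cases h10 : t = "typo_suggested"
  · exact Or.inr (Or.inr (Or.inr (Or.inr (Or.inr (Or.inr (Or.inr (Or.inr (Or.inr (Or.inr (Or.inl (⟨h10, by rw [h10]; decide⟩)))))))))))
  by_cases h11 : t = "typo_corrected"
  · exact Or.inr (Or.inr (Or.inr (Or.inr (Or.inr (Or.inr (Or.inr (Or.inr (Or.inr (Or.inr (Or.inr (⟨h11, by rw [h11]; decide⟩)))))))))))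
  refine Or.inl ?_
  unfold pvRk
  rw [if_neg h1, if_neg h2, if_neg h3, if_neg h4, if_neg h5, if_neg h6, if_neg h7, if_neg h8, if_neg h9, if_neg h10, if_neg h11]

lemma pvRk_le (t : String) : pvRk t ≤ 11 := by
  rcases pvRk_cases t with h | ⟨e, h⟩ | ⟨e, h⟩ | ⟨e, h⟩ | ⟨e, h⟩ | ⟨e, h⟩ | ⟨e, h⟩ | ⟨e, h⟩ | ⟨e, h⟩ | ⟨e, h⟩ | ⟨e, h⟩ | ⟨e, h⟩ <;> omega

lemma pvGet?_eq (t : String) :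
    PySem.Dict.get? pvRanked t = if pvRk t = 11 then none else some (pvRk t, pvRs (pvRk t)) := by
  by_cases h1 : t = "placeholder"
  · rw [h1]; decide
  by_cases h2 : t = "disposable"
  · rw [h2]; decide
  by_cases h3 : t = "syntax_invalid"
  · rw [h3]; decide
  by_cases h4 : t = "nxdomain"
  · rw [h4]; decide
  by_cases h5 : t = "no_domain"
  · rw [h5]; decide
  by_cases h6 : t = "role_account"
  · rw [h6]; decide
  by_cases h7 : t = "dns_no_records"
  · rw [h7]; decide
  by_cases h8 : t = "dns_error"
  · rw [h8]; decide
  by_cases h9 : t = "domain_mismatch"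
  · rw [h9]; decide
  by_cases h10 : t = "typo_suggested"
  · rw [h10]; decide
  by_cases h11 : t = "typo_corrected"
  · rw [h11]; decide
  have hrk : pvRk t = 11 := by
    rcases pvRk_cases t with h | ⟨e, h⟩ | ⟨e, h⟩ | ⟨e, h⟩ | ⟨e, h⟩ | ⟨e, h⟩ | ⟨e, h⟩ | ⟨e, h⟩ | ⟨e, h⟩ | ⟨e, h⟩ | ⟨e, h⟩ | ⟨e, h⟩
    · exact h
    all_goals first | exact absurd e h1 | exact absurd e h2 | exact absurd e h3 | exact absurd e h4 | exact absurd e h5 | exact absurd e h6 | exact absurd e h7 | exact absurd e h8 | exact absurd e h9 | exact absurd e h10 | exact absurd e h11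
  rw [hrk, if_pos rfl]
  have hx : pvRanked = PySem.Dict.mk
    [("placeholder", (0, "Fake or placeholder email")),
     ("disposable", (1, "Temporary/disposable email")),
     ("syntax_invalid", (2, "Invalid email format")),
     ("nxdomain", (3, "Domain does not exist")),
     ("no_domain", (4, "Domain does not exist")),
     ("role_account", (5, "Role-based email")),
     ("dns_no_records", (6, "No mail server (MX) found")),
     ("dns_error", (7, "Mail server check inconclusive")),
     ("domain_mismatch", (8, "Domain does not match input")),
     ("typo_suggested", (9, "Possible domain typo")),
     ("typo_corrected", (10, "Possible domain typo"))] := by decide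
  have b1 : (("placeholder" : String) == t) = false := beq_eq_false_iff_ne.mpr (Ne.symm h1)
  have b2 : (("disposable" : String) == t) = false := beq_eq_false_iff_ne.mpr (Ne.symm h2)
  have b3 : (("syntax_invalid" : String) == t) = false := beq_eq_false_iff_ne.mpr (Ne.symm h3)
  have b4 : (("nxdomain" : String) == t) = false := beq_eq_false_iff_ne.mpr (Ne.symm h4)
  have b5 : (("no_domain" : String) == t) = false := beq_eq_false_iff_ne.mpr (Ne.symm h5)
  have b6 : (("role_account" : String) == t) = false := beq_eq_false_iff_ne.mpr (Ne.symm h6)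
  have b7 : (("dns_no_records" : String) == t) = false := beq_eq_false_iff_ne.mpr (Ne.symm h7)
  have b8 : (("dns_error" : String) == t) = false := beq_eq_false_iff_ne.mpr (Ne.symm h8)
  have b9 : (("domain_mismatch" : String) == t) = false := beq_eq_false_iff_ne.mpr (Ne.symm h9)
  have b10 : (("typo_suggested" : String) == t) = false := beq_eq_false_iff_ne.mpr (Ne.symm h10)
  have b11 : (("typo_corrected" : String) == t) = false := beq_eq_false_iff_ne.mpr (Ne.symm h11)
  rw [hx, PySem.Dict.get?_mk_cons, b1, if_neg Bool.false_ne_true, PySem.Dict.get?_mk_cons, b2, if_neg Bool.false_ne_true, PySem.Dict.get?_mk_cons, b3, if_neg Bool.false_ne_true, PySem.Dict.get?_mk_cons, b4, if_neg Bool.false_ne_true, PySem.Dict.get?_mk_cons, b5, if_neg Bool.false_ne_true, PySem.Dict.get?_mk_cons, b6, if_neg Bool.false_ne_true, PySem.Dict.get?_mk_cons, b7, if_neg Bool.false_ne_true, PySem.Dict.get?_mk_cons, b8, if_neg Bool.false_ne_true, PySem.Dict.get?_mk_cons, b9, if_neg Bool.false_ne_true, PySem.Dict.get?_mk_cons, b10,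 if_neg Bool.false_ne_true, PySem.Dict.get?_mk_cons, b11, if_neg Bool.false_ne_true]
  rfl

-- B's step on an accumulator of the canonical form picks the min rank (left bias)
lemma pvStepB_eq (i : Int) (hi : i ≤ 11) (t : String) :
    pvStepB (i, pvRs i) t = (min i (pvRk t), pvRs (min i (pvRk t))) := by
  have h := pvRk_le t
  by_cases h11 : pvRk t = 11
  · have hg : PySem.Dict.get? pvRanked t = none := by rw [pvGet?_eq, if_pos h11]
    have hmin : min i (pvRk t) = i := by omega
    unfold pvStepB
    rw [hg, hmin]
  · have hg : PySem.Dict.get? pvRanked t = some (pvRk t, pvRs (pvRk t)) := by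
      rw [pvGet?_eq, if_neg h11]
    unfold pvStepB
    rw [hg]
    show (if pvRk t < i then (pvRk t, pvRs (pvRk t)) else (i, pvRs i)) =
      (min i (pvRk t), pvRs (min i (pvRk t)))
    by_cases hlt : pvRk t < i
    · rw [if_pos hlt, show min i (pvRk t) = pvRk t from by omega]
    · rw [if_neg hlt, show min i (pvRk t) = i from by omega]

-- running minimum of the ranks, started at i
def pvMr (i : Int) (L : List String) : Int := L.foldl (fun a t => min a (pvRk t)) i

lemma pvFoldB_eq (L : List String) : ∀ (i : Int), i ≤ 11 →
    L.foldl pvStepB (i, pvRs i) = (pvMr i L, pvRs (pvMr i L)) := by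
  induction L with
  | nil => intro i _; rfl
  | cons t rest ih =>
    intro i hi
    have h := pvRk_le t
    rw [List.foldl_cons, pvStepB_eq i hi t]
    exact ih (min i (pvRk t)) (by omega)

lemma pvMr_le_init (i : Int) (L : List String) : pvMr i L ≤ i := by
  induction L generalizing i with
  | nil => simp [pvMr]
  | cons t rest ih =>
    have := ih (min i (pvRk t))
    simp only [pvMr, List.foldl_cons] at *
    omega

lemma pvMr_le_of_mem {t : String} {L : List String} (h : t ∈ L) (i : Int) :
    pvMr i L ≤ pvRk t := by
  induction L generalizing i with
  | nil => simp at h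
  | cons u rest ih =>
    rcases List.mem_cons.mp h with h | h
    · subst h
      have := pvMr_le_init (min i (pvRk t)) rest
      simp only [pvMr, List.foldl_cons] at *
      omega
    · exact ih h _

lemma pvMr_ge {k : Int} {L : List String} (hL : ∀ t ∈ L, k ≤ pvRk t) : ∀ {i : Int}, k ≤ i →
    k ≤ pvMr i L := by
  induction L with
  | nil => intro i hi; simpa [pvMr]
  | cons u rest ih =>
    intro i hi
    have hu := hL u (by simp)
    simp only [pvMr, List.foldl_cons]
    exact ih (fun t ht => hL t (List.mem_cons_of_mem _ ht)) (by omega)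

lemma pvLoopA_cons (t : String) (rest : List String) (S : PySem.Set String) :
    pvLoopA (t :: rest) S =
      (if PySem.Set.contains S t then PySem.Dict.getD pvClientReasonMap t "" else pvLoopA rest S) := rfl

lemma pvLoopA_nil (S : PySem.Set String) : pvLoopA [] S = "" := rfl

-- the core: A's priority scan over (the set of) any token list equals B's fold over the list
lemma pvMain (L : List String) :
    pvLoopA pvClientReasonPriority (PySem.Set.ofList L) = (L.foldl pvStepB (11, "")).2 := by
  rw [show ((11 : Int), "") = ((11 : Int), pvRs 11) from by decide, pvFoldB_eq L 11 le_rfl]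
  have hmem : ∀ t : String, PySem.Set.contains (PySem.Set.ofList L) t = true ↔ t ∈ L := by
    intro t
    simp [PySem.Set.contains, PySem.Set.mem_ofList]
  unfold pvClientReasonPriority
  by_cases c1 : "placeholder" ∈ L
  · have hub := pvMr_le_of_mem c1 11
    have hlb : (0 : Int) ≤ pvMr 11 L := by
      refine pvMr_ge (fun t ht => ?_) (by omega)
      rcases pvRk_cases t with h | ⟨e, h⟩ | ⟨e, h⟩ | ⟨e, h⟩ | ⟨e, h⟩ | ⟨e, h⟩ | ⟨e, h⟩ | ⟨e, h⟩ | ⟨e, h⟩ | ⟨e, h⟩ | ⟨e, h⟩ | ⟨e, h⟩ <;>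
        first | omega 
    have hr : pvRk "placeholder" = 0 := by decide
    have hm : pvMr 11 L = 0 := by omega
    rw [pvLoopA_cons, if_pos ((hmem _).mpr c1), hm]
    decide
  rw [pvLoopA_cons, if_neg (fun hh => c1 ((hmem _).mp hh))]
  by_cases c2 : "disposable" ∈ L
  · have hub := pvMr_le_of_mem c2 11
    have hlb : (1 : Int) ≤ pvMr 11 L := by
      refine pvMr_ge (fun t ht => ?_) (by omega)
      rcases pvRk_cases t with h | ⟨e, h⟩ | ⟨e, h⟩ | ⟨e, h⟩ | ⟨e, h⟩ | ⟨e, h⟩ | ⟨e, h⟩ | ⟨e, h⟩ | ⟨e, h⟩ | ⟨e, h⟩ | ⟨e, h⟩ | ⟨e, h⟩ <;>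
        first | omega | (subst e; first | exact absurd ht c1)
    have hr : pvRk "disposable" = 1 := by decide
    have hm : pvMr 11 L = 1 := by omega
    rw [pvLoopA_cons, if_pos ((hmem _).mpr c2), hm]
    decide
  rw [pvLoopA_cons, if_neg (fun hh => c2 ((hmem _).mp hh))]
  by_cases c3 : "syntax_invalid" ∈ L
  · have hub := pvMr_le_of_mem c3 11
    have hlb : (2 : Int) ≤ pvMr 11 L := by
      refine pvMr_ge (fun t ht => ?_) (by omega)
      rcases pvRk_cases t with h | ⟨e, h⟩ | ⟨e, h⟩ | ⟨e, h⟩ | ⟨e, h⟩ | ⟨e, h⟩ | ⟨e, h⟩ | ⟨e, h⟩ | ⟨e, h⟩ | ⟨e, h⟩ | ⟨e, h⟩ | ⟨e, h⟩ <;>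
        first | omega | (subst e; first | exact absurd ht c1 | exact absurd ht c2)
    have hr : pvRk "syntax_invalid" = 2 := by decide
    have hm : pvMr 11 L = 2 := by omega
    rw [pvLoopA_cons, if_pos ((hmem _).mpr c3), hm]
    decide
  rw [pvLoopA_cons, if_neg (fun hh => c3 ((hmem _).mp hh))]
  by_cases c4 : "nxdomain" ∈ L
  · have hub := pvMr_le_of_mem c4 11
    have hlb : (3 : Int) ≤ pvMr 11 L := by
      refine pvMr_ge (fun t ht => ?_) (by omega)
      rcases pvRk_cases t with h | ⟨e, h⟩ | ⟨e, h⟩ | ⟨e, h⟩ | ⟨e, h⟩ | ⟨e, h⟩ | ⟨e, h⟩ | ⟨e, h⟩ | ⟨e, h⟩ | ⟨e, h⟩ | ⟨e, h⟩ | ⟨e, h⟩ <;>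
        first | omega | (subst e; first | exact absurd ht c1 | exact absurd ht c2 | exact absurd ht c3)
    have hr : pvRk "nxdomain" = 3 := by decide
    have hm : pvMr 11 L = 3 := by omega
    rw [pvLoopA_cons, if_pos ((hmem _).mpr c4), hm]
    decide
  rw [pvLoopA_cons, if_neg (fun hh => c4 ((hmem _).mp hh))]
  by_cases c5 : "no_domain" ∈ L
  · have hub := pvMr_le_of_mem c5 11
    have hlb : (4 : Int) ≤ pvMr 11 L := by
      refine pvMr_ge (fun t ht => ?_) (by omega)
      rcases pvRk_cases t with h | ⟨e, h⟩ | ⟨e, h⟩ | ⟨e, h⟩ | ⟨e, h⟩ | ⟨e, h⟩ | ⟨e, h⟩ | ⟨e, h⟩ | ⟨e, h⟩ | ⟨e, h⟩ | ⟨e, h⟩ | ⟨e, h⟩ <;>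
        first | omega | (subst e; first | exact absurd ht c1 | exact absurd ht c2 | exact absurd ht c3 | exact absurd ht c4)
    have hr : pvRk "no_domain" = 4 := by decide
    have hm : pvMr 11 L = 4 := by omega
    rw [pvLoopA_cons, if_pos ((hmem _).mpr c5), hm]
    decide
  rw [pvLoopA_cons, if_neg (fun hh => c5 ((hmem _).mp hh))]
  by_cases c6 : "role_account" ∈ L
  · have hub := pvMr_le_of_mem c6 11
    have hlb : (5 : Int) ≤ pvMr 11 L := by
      refine pvMr_ge (fun t ht => ?_) (by omega)
      rcases pvRk_cases t with h | ⟨e, h⟩ | ⟨e, h⟩ | ⟨e, h⟩ | ⟨e, h⟩ | ⟨e, h⟩ | ⟨e, h⟩ | ⟨e, h⟩ | ⟨e, h⟩ | ⟨e, h⟩ | ⟨e, h⟩ | ⟨e, h⟩ <;>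
        first | omega | (subst e; first | exact absurd ht c1 | exact absurd ht c2 | exact absurd ht c3 | exact absurd ht c4 | exact absurd ht c5)
    have hr : pvRk "role_account" = 5 := by decide
    have hm : pvMr 11 L = 5 := by omega
    rw [pvLoopA_cons, if_pos ((hmem _).mpr c6), hm]
    decide
  rw [pvLoopA_cons, if_neg (fun hh => c6 ((hmem _).mp hh))]
  by_cases c7 : "dns_no_records" ∈ L
  · have hub := pvMr_le_of_mem c7 11
    have hlb : (6 : Int) ≤ pvMr 11 L := by
      refine pvMr_ge (fun t ht => ?_) (by omega)
      rcases pvRk_cases t with h | ⟨e, h⟩ | ⟨e, h⟩ | ⟨e, h⟩ | ⟨e, h⟩ | ⟨e, h⟩ | ⟨e, h⟩ | ⟨e, h⟩ | ⟨e, h⟩ | ⟨e, h⟩ | ⟨e, h⟩ | ⟨e, h⟩ <;>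
        first | omega | (subst e; first | exact absurd ht c1 | exact absurd ht c2 | exact absurd ht c3 | exact absurd ht c4 | exact absurd ht c5 | exact absurd ht c6)
    have hr : pvRk "dns_no_records" = 6 := by decide
    have hm : pvMr 11 L = 6 := by omega
    rw [pvLoopA_cons, if_pos ((hmem _).mpr c7), hm]
    decide
  rw [pvLoopA_cons, if_neg (fun hh => c7 ((hmem _).mp hh))]
  by_cases c8 : "dns_error" ∈ L
  · have hub := pvMr_le_of_mem c8 11
    have hlb : (7 : Int) ≤ pvMr 11 L := by
      refine pvMr_ge (fun t ht => ?_) (by omega)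
      rcases pvRk_cases t with h | ⟨e, h⟩ | ⟨e, h⟩ | ⟨e, h⟩ | ⟨e, h⟩ | ⟨e, h⟩ | ⟨e, h⟩ | ⟨e, h⟩ | ⟨e, h⟩ | ⟨e, h⟩ | ⟨e, h⟩ | ⟨e, h⟩ <;>
        first | omega | (subst e; first | exact absurd ht c1 | exact absurd ht c2 | exact absurd ht c3 | exact absurd ht c4 | exact absurd ht c5 | exact absurd ht c6 | exact absurd ht c7)
    have hr : pvRk "dns_error" = 7 := by decide
    have hm : pvMr 11 L = 7 := by omega
    rw [pvLoopA_cons, if_pos ((hmem _).mpr c8), hm]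
    decide
  rw [pvLoopA_cons, if_neg (fun hh => c8 ((hmem _).mp hh))]
  by_cases c9 : "domain_mismatch" ∈ L
  · have hub := pvMr_le_of_mem c9 11
    have hlb : (8 : Int) ≤ pvMr 11 L := by
      refine pvMr_ge (fun t ht => ?_) (by omega)
      rcases pvRk_cases t with h | ⟨e, h⟩ | ⟨e, h⟩ | ⟨e, h⟩ | ⟨e, h⟩ | ⟨e, h⟩ | ⟨e, h⟩ | ⟨e, h⟩ | ⟨e, h⟩ | ⟨e, h⟩ | ⟨e, h⟩ | ⟨e, h⟩ <;>
        first | omega | (subst e; first | exact absurd ht c1 | exact absurd ht c2 | exact absurd ht c3 | exact absurd ht c4 | exact absurd ht c5 | exact absurd ht c6 | exact absurd ht c7 | exact absurd ht c8)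
    have hr : pvRk "domain_mismatch" = 8 := by decide
    have hm : pvMr 11 L = 8 := by omega
    rw [pvLoopA_cons, if_pos ((hmem _).mpr c9), hm]
    decide
  rw [pvLoopA_cons, if_neg (fun hh => c9 ((hmem _).mp hh))]
  by_cases c10 : "typo_suggested" ∈ L
  · have hub := pvMr_le_of_mem c10 11
    have hlb : (9 : Int) ≤ pvMr 11 L := by
      refine pvMr_ge (fun t ht => ?_) (by omega)
      rcases pvRk_cases t with h | ⟨e, h⟩ | ⟨e, h⟩ | ⟨e, h⟩ | ⟨e, h⟩ | ⟨e, h⟩ | ⟨e, h⟩ | ⟨e, h⟩ | ⟨e, h⟩ | ⟨e, h⟩ | ⟨e, h⟩ | ⟨e, h⟩ <;>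
        first | omega | (subst e; first | exact absurd ht c1 | exact absurd ht c2 | exact absurd ht c3 | exact absurd ht c4 | exact absurd ht c5 | exact absurd ht c6 | exact absurd ht c7 | exact absurd ht c8 | exact absurd ht c9)
    have hr : pvRk "typo_suggested" = 9 := by decide
    have hm : pvMr 11 L = 9 := by omega
    rw [pvLoopA_cons, if_pos ((hmem _).mpr c10), hm]
    decide
  rw [pvLoopA_cons, if_neg (fun hh => c10 ((hmem _).mp hh))]
  by_cases c11 : "typo_corrected" ∈ L
  · have hub := pvMr_le_of_mem c11 11
    have hlb : (10 : Int) ≤ pvMr 11 L := by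
      refine pvMr_ge (fun t ht => ?_) (by omega)
      rcases pvRk_cases t with h | ⟨e, h⟩ | ⟨e, h⟩ | ⟨e, h⟩ | ⟨e, h⟩ | ⟨e, h⟩ | ⟨e, h⟩ | ⟨e, h⟩ | ⟨e, h⟩ | ⟨e, h⟩ | ⟨e, h⟩ | ⟨e, h⟩ <;>
        first | omega | (subst e; first | exact absurd ht c1 | exact absurd ht c2 | exact absurd ht c3 | exact absurd ht c4 | exact absurd ht c5 | exact absurd ht c6 | exact absurd ht c7 | exact absurd ht c8 | exact absurd ht c9 | exact absurd ht c10)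
    have hr : pvRk "typo_corrected" = 10 := by decide
    have hm : pvMr 11 L = 10 := by omega
    rw [pvLoopA_cons, if_pos ((hmem _).mpr c11), hm]
    decide
  rw [pvLoopA_cons, if_neg (fun hh => c11 ((hmem _).mp hh))]
  have hlb : (11 : Int) ≤ pvMr 11 L := by
    refine pvMr_ge (fun t ht => ?_) (by omega)
    rcases pvRk_cases t with h | ⟨e, h⟩ | ⟨e, h⟩ | ⟨e, h⟩ | ⟨e, h⟩ | ⟨e, h⟩ | ⟨e, h⟩ | ⟨e, h⟩ | ⟨e, h⟩ | ⟨e, h⟩ | ⟨e, h⟩ | ⟨e, h⟩ <;>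
      first | omega | (subst e; first | exact absurd ht c1 | exact absurd ht c2 | exact absurd ht c3 | exact absurd ht c4 | exact absurd ht c5 | exact absurd ht c6 | exact absurd ht c7 | exact absurd ht c8 | exact absurd ht c9 | exact absurd ht c10 | exact absurd ht c11)
  have hub := pvMr_le_init 11 L
  have hm : pvMr 11 L = 11 := by omega
  rw [pvLoopA_nil, hm]
  decide

-- ===== VERDICT (by name: the statement is the Claim_ definition above) =====
theorem compute_client_reason_py_spec : Claim_equal_compute_client_reason_py := by
  intro s _
  unfold Spec_compute_client_reason_py compute_client_reason_py compute_client_reason_py_alt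
  by_cases hs : s = ""
  · rw [hs]; decide
  · rw [if_neg hs]
    exact pvMain _
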